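-- pv_equiv track=rewrite | github.com/kellyr-dev/Leetcode-practice | miscellaneus.py | kthSmallestMatrix
-- ===== SOURCE A (Python) =====
-- import re, heapq, math
--
-- def kthSmallestMatrix(matrix, k):
--
--     aux = []
--
--     for i in range(len(matrix)):
--         for j in range(len(matrix[0])):
--             aux.append(matrix[i][j])
--
--     heapq.heapify(aux)
--     value = -1
--     for i in range(k):
--         value = heapq.heappop(aux)
--
--     return value
-- ===== SOURCE B (Python) =====
-- def kthSmallestMatrix(matrix, k):
--     rows, cols = len(matrix), len(matrix[0])
--     flat = sorted(matrix[i][j] for i in range(rows) for j in range(cols))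
--     return flat[k - 1] if 1 <= k <= len(flat) else -1
-- ===== Notes on version B (the rewrite author's own statement) =====
-- stated objective: simpler
-- what changed: Replaces flatten + heapify + k heappops with a single sort of the matrix values indexed at k-1, with -1 for an out-of-range k; Pre_ excludes the empty matrix (the task's natural domain is a nonempty matrix; B raises there while A happens to return its -1 sentinel for k <= 0).
-- outside the precondition, e.g. on kthSmallestMatrix([], 0): A returns -1, B raises IndexError; on kthSmallestMatrix([[1]], 2): A raises IndexError, B returns -1
import Mathlib
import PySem

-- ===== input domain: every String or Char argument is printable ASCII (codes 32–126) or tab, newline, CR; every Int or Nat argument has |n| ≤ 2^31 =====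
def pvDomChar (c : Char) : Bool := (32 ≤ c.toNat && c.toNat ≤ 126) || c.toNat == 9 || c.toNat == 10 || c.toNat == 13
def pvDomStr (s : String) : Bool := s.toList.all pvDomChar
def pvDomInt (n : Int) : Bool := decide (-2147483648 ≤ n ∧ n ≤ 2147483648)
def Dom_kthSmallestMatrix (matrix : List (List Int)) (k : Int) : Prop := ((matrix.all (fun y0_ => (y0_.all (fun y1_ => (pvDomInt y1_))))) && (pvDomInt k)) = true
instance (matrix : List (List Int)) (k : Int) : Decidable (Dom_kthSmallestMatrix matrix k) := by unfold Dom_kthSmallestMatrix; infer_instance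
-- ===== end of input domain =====

-- B sorts the matrix values once and indexes at k-1 (-1 for an out-of-range k),
-- instead of A's heapify + k heappops.

-- ===== PORT A =====
-- heapq.heappop on a nonempty heap returns the heap's minimum (first minimal element) and
-- removes one occurrence of it; this loop is A's k pops, modelling each library pop by that
-- exact contract (the heap's internal array layout is not observable in A's returned value).
def pvPopLoop : Nat → List Int → Int → Int
  | 0, _, v => v
  | n + 1, aux, v =>
    match PySem.List.min? aux (fun x => x) with
    | none => v          -- heappop would raise IndexError here; excluded by Pre_
    | some m => pvPopLoop n ((PySem.List.remove? aux m).getD aux) m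

def kthSmallestMatrix (matrix : List (List Int)) (k : Int) : Int :=
  let aux :=
    (PySem.List.pyRange 0 (matrix.length : Int) 1).foldl (fun acc i =>
      (PySem.List.pyRange 0 (((matrix.headD []).length : Nat) : Int) 1).foldl (fun acc2 j =>
        acc2 ++ [PySem.List.pyGetD (PySem.List.pyGetD matrix i []) j 0]) acc) []
  pvPopLoop k.toNat aux (-1)

-- ===== PORT B =====
def kthSmallestMatrix_alt (matrix : List (List Int)) (k : Int) : Int :=
  let rows := matrix.length
  let cols := ((PySem.List.pyGet? matrix 0).getD []).length
  let flat := PySem.List.sorted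
    ((PySem.List.pyRange 0 (rows : Int) 1).flatMap (fun i =>
      (PySem.List.pyRange 0 (cols : Int) 1).map (fun j =>
        PySem.List.pyGetD (PySem.List.pyGetD matrix i []) j 0)))
    (fun x => x) false
  if 1 ≤ k ∧ k ≤ (flat.length : Int) then (PySem.List.pyGet? flat (k - 1)).getD 0 else -1

-- ===== PRECONDITION & SPEC =====
-- Pre_ is A's return domain on the task's natural input, a NONEMPTY matrix: a row shorter
-- than row 0 makes A's matrix[i][j] raise IndexError, and k above the number of visited
-- elements makes heappop raise IndexError on the emptied heap, so both are excluded; the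
-- empty matrix is excluded because B's len(matrix[0]) raises there while A happens to
-- return its -1 sentinel for k ≤ 0 (see claim cites).
def Pre_kthSmallestMatrix (matrix : List (List Int)) (k : Int) : Prop :=
  matrix ≠ [] ∧
  (∀ row ∈ matrix, (matrix.headD []).length ≤ row.length) ∧
  k ≤ (matrix.length : Int) * ((matrix.headD []).length : Int)
instance (matrix : List (List Int)) (k : Int) : Decidable (Pre_kthSmallestMatrix matrix k) := by
  unfold Pre_kthSmallestMatrix; infer_instance

def pvWitness_kthSmallestMatrix : List (List Int) × Int := ([[5, 1], [3, 2]], 3)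

def Spec_kthSmallestMatrix (matrix : List (List Int)) (k : Int) (out : Int) : Prop := out = kthSmallestMatrix_alt matrix k
instance (matrix : List (List Int)) (k : Int) (out : Int) : Decidable (Spec_kthSmallestMatrix matrix k out) := by unfold Spec_kthSmallestMatrix; infer_instance

-- ===== CLAIM (what is proved, stated in full; the proofs are below) =====
def Claim_equal_kthSmallestMatrix : Prop := ∀ (matrix : List (List Int)) (k : Int), Dom_kthSmallestMatrix matrix k → Pre_kthSmallestMatrix matrix k → Spec_kthSmallestMatrix matrix k (kthSmallestMatrix matrix k)

-- ===== LEMMAS AND PROOFS =====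

-- reading row[0], …, row[w-1] collects row.take w
lemma pvMapTake (row : List Int) (w : Nat) (hw : w ≤ row.length) :
    (PySem.List.pyRange 0 (w : Int) 1).map (fun j => PySem.List.pyGetD row j 0)
      = row.take w := by
  rw [PySem.List.pyRange_zero_nat, List.map_map]
  apply List.ext_getElem
  · simp [Nat.min_eq_left hw]
  · intro i h1 h2
    have hi : i < row.length := by simp at h1; omega
    simp [PySem.List.pyGetD_natCast, List.getD_eq_getElem?_getD, List.getElem?_eq_getElem hi]

-- A's inner loop over j appends row[0..w-1]
lemma pvInner_eq_take (row : List Int) (w : Nat) (hw : w ≤ row.length) (acc : List Int) :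
    (PySem.List.pyRange 0 (w : Int) 1).foldl
      (fun acc2 j => acc2 ++ [PySem.List.pyGetD row j 0]) acc = acc ++ row.take w := by
  rw [PySem.List.foldl_append_singleton_eq_map, pvMapTake row w hw]

-- A's outer loop is a flatMap of truncated rows
lemma pvOuter (w : Nat) (l : List (List Int)) (h : ∀ row ∈ l, w ≤ row.length) (acc : List Int) :
    l.foldl (fun acc row =>
      (PySem.List.pyRange 0 (w : Int) 1).foldl
        (fun acc2 j => acc2 ++ [PySem.List.pyGetD row j 0]) acc) acc
    = acc ++ l.flatMap (fun row => row.take w) := by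
  induction l generalizing acc with
  | nil => simp
  | cons r t ih =>
    simp only [List.foldl_cons, List.flatMap_cons]
    rw [pvInner_eq_take r w (h r (by simp)) acc, ih (fun row hr => h row (by simp [hr]))]
    simp

lemma pvAux_eq_flat (matrix : List (List Int))
    (hrows : ∀ row ∈ matrix, (matrix.headD []).length ≤ row.length) :
    (PySem.List.pyRange 0 (matrix.length : Int) 1).foldl (fun acc i =>
      (PySem.List.pyRange 0 (((matrix.headD []).length : Nat) : Int) 1).foldl (fun acc2 j =>
        acc2 ++ [PySem.List.pyGetD (PySem.List.pyGetD matrix i []) j 0]) acc) []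
    = matrix.flatMap (fun row => row.take (matrix.headD []).length) := by
  have h1 := PySem.List.foldl_pyRange_zero_pyGetD' matrix []
    (fun acc row =>
      (PySem.List.pyRange 0 (((matrix.headD []).length : Nat) : Int) 1).foldl
        (fun acc2 j => acc2 ++ [PySem.List.pyGetD row j 0]) acc) []
  exact h1.trans ((pvOuter (matrix.headD []).length matrix hrows []).trans (by simp))

-- B's comprehension builds the same flatMap of truncated rows
lemma pvBFlat (matrix : List (List Int))
    (hrows : ∀ row ∈ matrix, (matrix.headD []).length ≤ row.length) :
    (PySem.List.pyRange 0 (matrix.length : Int) 1).flatMap (fun i =>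
      (PySem.List.pyRange 0 (((matrix.headD []).length : Nat) : Int) 1).map (fun j =>
        PySem.List.pyGetD (PySem.List.pyGetD matrix i []) j 0))
    = matrix.flatMap (fun row => row.take (matrix.headD []).length) := by
  have hmap := PySem.List.map_pyGetD_pyRange_zero' matrix ([] : List Int)
  calc (PySem.List.pyRange 0 (matrix.length : Int) 1).flatMap (fun i =>
          (PySem.List.pyRange 0 (((matrix.headD []).length : Nat) : Int) 1).map (fun j =>
            PySem.List.pyGetD (PySem.List.pyGetD matrix i []) j 0))
      = (((PySem.List.pyRange 0 (matrix.length : Int) 1).map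
            (fun i => PySem.List.pyGetD matrix i [])).flatMap (fun row =>
          (PySem.List.pyRange 0 (((matrix.headD []).length : Nat) : Int) 1).map (fun j =>
            PySem.List.pyGetD row j 0))) := by rw [List.flatMap_map]
    _ = matrix.flatMap (fun row =>
          (PySem.List.pyRange 0 (((matrix.headD []).length : Nat) : Int) 1).map (fun j =>
            PySem.List.pyGetD row j 0)) := by rw [hmap]
    _ = matrix.flatMap (fun row => row.take (matrix.headD []).length) := by
          apply List.flatMap_congr
          intro row hr
          exact pvMapTake row _ (hrows row hr)

lemma pvFlat_length (w : Nat) (l : List (List Int)) (h : ∀ row ∈ l, w ≤ row.length) :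
    (l.flatMap (fun row => row.take w)).length = l.length * w := by
  induction l with
  | nil => simp
  | cons r t ih =>
    have := ih (fun row hr => h row (by simp [hr]))
    simp [List.length_take, Nat.min_eq_left (h r (by simp)), this, Nat.succ_mul, Nat.add_comm]

-- matrix[0] read with a default is the head with that default
lemma pvGet0_headD (matrix : List (List Int)) :
    ((PySem.List.pyGet? matrix 0).getD []) = matrix.headD [] := by
  cases matrix <;> simp [PySem.List.pyGet?, PySem.List.pyIdx?]

-- popping the minimum takes the head of the sorted order
lemma pvSorted_cons_of_min (aux : List Int) (m : Int)
    (hm : PySem.List.min? aux (fun x => x) = some m) :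
    PySem.List.sorted aux (fun x => x) false
      = m :: PySem.List.sorted (aux.erase m) (fun x => x) false := by
  have hmem : m ∈ aux := PySem.List.min?_mem hm
  have hmin := PySem.List.min?_isMin hm
  apply PySem.List.eq_of_perm_of_pairwise_le_of_injective (fun x : Int => x) (fun a b h => h)
  · exact (PySem.List.sorted_perm aux _ false).trans
      ((List.perm_cons_erase hmem).trans
        (((PySem.List.sorted_perm (aux.erase m) _ false).symm).cons m))
  · exact PySem.List.sorted_pairwise aux _
  · refine List.pairwise_cons.mpr ⟨?_, PySem.List.sorted_pairwise _ _⟩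
    intro y hy
    exact hmin y (List.mem_of_mem_erase ((PySem.List.mem_sorted _ _ _ _).1 hy))

lemma pvMin_exists (aux : List Int) (h : aux ≠ []) :
    ∃ m, PySem.List.min? aux (fun x => x) = some m := by
  cases hmm : PySem.List.min? aux (fun x => x) with
  | none => exact absurd ((PySem.List.min?_eq_none_iff aux _).1 hmm) h
  | some m => exact ⟨m, rfl⟩

-- A's n+1 pops land on position n of the sorted order
lemma pvPopLoop_eq_sorted_getD (n : Nat) : ∀ (aux : List Int) (v : Int), n < aux.length →
    pvPopLoop (n + 1) aux v = (PySem.List.sorted aux (fun x => x) false).getD n 0 := by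
  induction n with
  | zero =>
    intro aux v h
    obtain ⟨m, hm⟩ := pvMin_exists aux (by intro he; simp [he] at h)
    simp [pvPopLoop, hm, pvSorted_cons_of_min aux m hm]
  | succ n ih =>
    intro aux v h
    obtain ⟨m, hm⟩ := pvMin_exists aux (by intro he; simp [he] at h)
    have hmem : m ∈ aux := PySem.List.min?_mem hm
    have hrm := PySem.List.remove?_eq_some_erase aux m hmem
    have hlen : n < (aux.erase m).length := by
      rw [List.length_erase_of_mem hmem]; omega
    calc pvPopLoop (n + 1 + 1) aux v
        = pvPopLoop (n + 1) (aux.erase m) m := by simp [pvPopLoop, hm, hrm]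
      _ = (PySem.List.sorted (aux.erase m) (fun x => x) false).getD n 0 := ih _ _ hlen
      _ = (PySem.List.sorted aux (fun x => x) false).getD (n + 1) 0 := by
            rw [pvSorted_cons_of_min aux m hm, List.getD_cons_succ]

-- ===== VERDICT (by name: the statement is the Claim_ definition above) =====
theorem kthSmallestMatrix_spec : Claim_equal_kthSmallestMatrix := by
  intro matrix k _ hpre
  obtain ⟨hne, hrows, hk⟩ := hpre
  unfold Spec_kthSmallestMatrix kthSmallestMatrix kthSmallestMatrix_alt
  simp only [pvGet0_headD]
  rw [pvAux_eq_flat matrix hrows, pvBFlat matrix hrows]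
  set flat := matrix.flatMap (fun row => row.take (matrix.headD []).length) with hflat
  have hN : flat.length = matrix.length * (matrix.headD []).length :=
    pvFlat_length (matrix.headD []).length matrix hrows
  have hslen : (PySem.List.sorted flat (fun x => x) false).length = flat.length :=
    (PySem.List.sorted_perm flat (fun x => x) false).length_eq
  by_cases hk1 : 1 ≤ k
  · have hkN : k.toNat ≤ flat.length := by
      have : k ≤ ((matrix.length * (matrix.headD []).length : Nat) : Int) := by
        push_cast; exact hk
      omega
    rw [if_pos ⟨hk1, by omega⟩]
    obtain ⟨n, hn⟩ : ∃ n, k.toNat = n + 1 := ⟨k.toNat - 1, by omega⟩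
    have hnlt : n < flat.length := by omega
    rw [hn, pvPopLoop_eq_sorted_getD n flat (-1) hnlt]
    have hk1' : k - 1 = ((n : Nat) : Int) := by omega
    simp only [hk1', PySem.List.pyGet?_natCast, List.getD_eq_getElem?_getD]
  · have h0 : k.toNat = 0 := by omega
    rw [if_neg (by intro h; exact hk1 h.1), h0]
    rfl
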